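-- pv_equiv track=rewrite | github.com/igornet0/SimExchange | trading_strategies.py | get_strategy_distribution
-- ===== SOURCE A (Python) =====
-- from typing import List, Optional, Dict, Any
-- from enum import Enum
--
-- class StrategyType(Enum):
--     MOMENTUM = "MOMENTUM"           # Следование тренду
--     MEAN_REVERSION = "MEAN_REVERSION"  # Возврат к среднему
--     ARBITRAGE = "ARBITRAGE"         # Арбитраж
--     MARKET_MAKER = "MARKET_MAKER"   # Маркет-мейкер
--     SCALPER = "SCALPER"            # Скальпер
--     SWING_TRADER = "SWING_TRADER"   # Свинг-трейдер
--     VALUE_INVESTOR = "VALUE_INVESTOR"  # Инвестор по стоимости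
--     NOISE_TRADER = "NOISE_TRADER"   # Шумовой трейдер
--
-- def get_strategy_distribution(num_agents: int) -> List[StrategyType]:
--     """Возвращает распределение стратегий для агентов"""
--     strategies = []
--
--     for i in range(num_agents):
--         if i % 10 == 0:
--             strategies.append(StrategyType.MOMENTUM)
--         elif i % 10 == 1:
--             strategies.append(StrategyType.MEAN_REVERSION)
--         elif i % 10 == 2:
--             strategies.append(StrategyType.MARKET_MAKER)
--         elif i % 10 == 3:
--             strategies.append(StrategyType.SCALPER)
--         elif i % 10 == 4:
--             strategies.append(StrategyType.VALUE_INVESTOR)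
--         else:
--             strategies.append(StrategyType.NOISE_TRADER)
--
--     return strategies
-- ===== SOURCE B (Python) =====
-- from typing import List
-- from enum import Enum
--
-- class StrategyType(Enum):
--     MOMENTUM = "MOMENTUM"
--     MEAN_REVERSION = "MEAN_REVERSION"
--     ARBITRAGE = "ARBITRAGE"
--     MARKET_MAKER = "MARKET_MAKER"
--     SCALPER = "SCALPER"
--     SWING_TRADER = "SWING_TRADER"
--     VALUE_INVESTOR = "VALUE_INVESTOR"
--     NOISE_TRADER = "NOISE_TRADER"
--
-- _TEMPLATE = [
--     StrategyType.MOMENTUM,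
--     StrategyType.MEAN_REVERSION,
--     StrategyType.MARKET_MAKER,
--     StrategyType.SCALPER,
--     StrategyType.VALUE_INVESTOR,
-- ] + [StrategyType.NOISE_TRADER] * 5
--
-- def get_strategy_distribution(num_agents: int) -> List[StrategyType]:
--     reps = (max(num_agents, 0) + 9) // 10
--     return (_TEMPLATE * reps)[:num_agents]
-- ===== Notes on version B (the rewrite author's own statement) =====
-- stated objective: simpler
-- what changed: Replaces the per-index loop with a multi-way modulo branch by tiling a fixed one-period template list (template * reps) and slicing it down to num_agents.
import Mathlib
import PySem

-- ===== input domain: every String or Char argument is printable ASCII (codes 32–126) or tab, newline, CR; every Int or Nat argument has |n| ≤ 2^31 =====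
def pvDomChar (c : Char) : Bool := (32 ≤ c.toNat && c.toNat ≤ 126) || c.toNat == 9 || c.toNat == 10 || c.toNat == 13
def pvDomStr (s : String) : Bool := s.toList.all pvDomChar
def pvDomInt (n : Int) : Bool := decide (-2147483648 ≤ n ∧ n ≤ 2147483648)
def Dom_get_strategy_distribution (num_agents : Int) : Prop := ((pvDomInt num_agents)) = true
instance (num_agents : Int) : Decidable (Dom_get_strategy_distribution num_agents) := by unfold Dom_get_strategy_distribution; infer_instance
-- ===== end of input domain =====

-- B replaces the per-index mod-10 branch loop by tiling a fixed 10-element period and slicing (objective: simpler).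

-- ===== PORT A =====
def get_strategy_distribution (num_agents : Int) : List String :=
  (PySem.List.pyRange 0 num_agents 1).foldl
    (fun strategies i =>
      if PySem.Int.mod i 10 = 0 then strategies ++ ["MOMENTUM"]
      else if PySem.Int.mod i 10 = 1 then strategies ++ ["MEAN_REVERSION"]
      else if PySem.Int.mod i 10 = 2 then strategies ++ ["MARKET_MAKER"]
      else if PySem.Int.mod i 10 = 3 then strategies ++ ["SCALPER"]
      else if PySem.Int.mod i 10 = 4 then strategies ++ ["VALUE_INVESTOR"]
      else strategies ++ ["NOISE_TRADER"]) []

-- ===== PORT B =====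
def pvTemplate : List String :=
  ["MOMENTUM", "MEAN_REVERSION", "MARKET_MAKER", "SCALPER", "VALUE_INVESTOR"]
    ++ List.replicate 5 "NOISE_TRADER"

def get_strategy_distribution_alt (num_agents : Int) : List String :=
  let reps := PySem.Int.floordiv (max num_agents 0 + 9) 10
  PySem.List.slice (PySem.List.pyRepeat pvTemplate reps) none (some num_agents)

-- ===== PRECONDITION & SPEC =====
def Spec_get_strategy_distribution (num_agents : Int) (out : List String) : Prop := out = get_strategy_distribution_alt num_agents
instance (num_agents : Int) (out : List String) : Decidable (Spec_get_strategy_distribution num_agents out) := by unfold Spec_get_strategy_distribution; infer_instance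

-- ===== CLAIM (what is proved, stated in full; the proofs are below) =====
def Claim_equal_get_strategy_distribution : Prop := ∀ (num_agents : Int), Dom_get_strategy_distribution num_agents → Spec_get_strategy_distribution num_agents (get_strategy_distribution num_agents)

-- ===== LEMMAS AND PROOFS =====

-- the per-index classification A performs
def pvStrat (i : Int) : String :=
  if PySem.Int.mod i 10 = 0 then "MOMENTUM"
  else if PySem.Int.mod i 10 = 1 then "MEAN_REVERSION"
  else if PySem.Int.mod i 10 = 2 then "MARKET_MAKER"
  else if PySem.Int.mod i 10 = 3 then "SCALPER"
  else if PySem.Int.mod i 10 = 4 then "VALUE_INVESTOR"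
  else "NOISE_TRADER"

-- pvStrat at a Nat index
def pvStratN (k : Nat) : String := pvStrat (k : Int)

theorem pvA_eq_map (n : Int) :
    get_strategy_distribution n = (PySem.List.pyRange 0 n 1).map pvStrat := by
  unfold get_strategy_distribution
  have h : (fun (strategies : List String) (i : Int) =>
      if PySem.Int.mod i 10 = 0 then strategies ++ ["MOMENTUM"]
      else if PySem.Int.mod i 10 = 1 then strategies ++ ["MEAN_REVERSION"]
      else if PySem.Int.mod i 10 = 2 then strategies ++ ["MARKET_MAKER"]
      else if PySem.Int.mod i 10 = 3 then strategies ++ ["SCALPER"]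
      else if PySem.Int.mod i 10 = 4 then strategies ++ ["VALUE_INVESTOR"]
      else strategies ++ ["NOISE_TRADER"]) =
      (fun strategies i => strategies ++ [pvStrat i]) := by
    funext acc i
    unfold pvStrat
    split_ifs <;> rfl
  rw [h, PySem.List.foldl_append_singleton_eq_map]
  simp

theorem pvStratN_add_ten (k : Nat) : pvStratN (10 + k) = pvStratN k := by
  have hm : PySem.Int.mod ((10 + k : Nat) : Int) 10 = PySem.Int.mod (k : Int) 10 := by
    rw [PySem.Int.mod_eq_emod_of_pos (by norm_num),
        PySem.Int.mod_eq_emod_of_pos (by norm_num)]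
    omega
  unfold pvStratN pvStrat
  rw [hm]

theorem pvTile (r m : Nat) (h : m ≤ 10 * r) :
    (List.range m).map pvStratN = ((List.replicate r pvTemplate).flatten).take m := by
  induction r generalizing m with
  | zero =>
      interval_cases m
      decide
  | succ r ih =>
      rw [List.replicate_succ, List.flatten_cons]
      by_cases hm : m ≤ 10
      · rw [List.take_append]
        have h5 : m - pvTemplate.length = 0 := by
          simp [pvTemplate]; omega
        rw [h5, List.take_zero, List.append_nil]
        interval_cases m <;> decide
      · have hsplit : m = 10 + (m - 10) := by omega
        rw [hsplit, List.range_add, List.map_append, List.map_map]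
        have hfun : (pvStratN ∘ (fun j => 10 + j)) = pvStratN := by
          funext k
          exact pvStratN_add_ten k
        rw [hfun, List.take_append]
        have hlen : pvTemplate.length = 10 := by decide
        have hfirst : (List.range 10).map pvStratN =
            pvTemplate.take (10 + (m - 10)) := by
          rw [List.take_of_length_le (by omega)]
          decide
        rw [hfirst, hlen]
        have h10 : 10 + (m - 10) - 10 = m - 10 := by omega
        rw [h10, ih (m - 10) (by omega)]

theorem get_strategy_distribution_eq (n : Int) :
    get_strategy_distribution n = get_strategy_distribution_alt n := by
  rw [pvA_eq_map]
  unfold get_strategy_distribution_alt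
  by_cases hn : n ≤ 0
  · have hrange : PySem.List.pyRange 0 n 1 = [] := PySem.List.pyRange_one_eq_nil hn
    have hmax : max n 0 = 0 := by omega
    rw [hrange, hmax]
    simp [PySem.Int.floordiv, PySem.List.pyRepeat, PySem.List.slice]
  · obtain ⟨m, hm⟩ : ∃ m : Nat, n = (m : Int) := ⟨n.toNat, by omega⟩
    subst hm
    have hmax : max (m : Int) 0 = (m : Int) := by omega
    have hdiv : PySem.Int.floordiv ((m : Int) + 9) 10 = (((m + 9) / 10 : Nat) : Int) := by
      rw [PySem.Int.floordiv_eq_ediv_of_pos (by norm_num)]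
      push_cast
      omega
    show (PySem.List.pyRange 0 (m : Int) 1).map pvStrat =
      PySem.List.slice
        (PySem.List.pyRepeat pvTemplate (PySem.Int.floordiv (max (m : Int) 0 + 9) 10))
        none (some (m : Int))
    rw [hmax, hdiv]
    unfold PySem.List.pyRepeat
    rw [Int.toNat_natCast, PySem.List.slice_to_natCast,
        PySem.List.pyRange_zero_natCast, List.map_map,
        ← pvTile ((m + 9) / 10) m (by omega)]
    rfl

-- ===== VERDICT (by name: the statement is the Claim_ definition above) =====
theorem get_strategy_distribution_spec : Claim_equal_get_strategy_distribution := by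
  intro n _
  unfold Spec_get_strategy_distribution
  exact get_strategy_distribution_eq n
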